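-- pv_equiv track=rewrite | github.com/tommasocarraro/SemNeSyKTRecSys | path-stats.py | count_paths_between_items
-- ===== SOURCE A (Python) =====
-- def count_paths_between_items(paths, high_rating_items, low_rating_items):
--     count = 0
--     for high_item in high_rating_items:
--         if high_item in paths:
--             for low_item in low_rating_items:
--                 if low_item in paths[high_item] and isinstance(paths[high_item][low_item], list):
--                     count += 1
--     return count
-- ===== SOURCE B (Python) =====
-- def count_paths_between_items(paths, high_rating_items, low_rating_items):
--     # Count each low item's multiplicity once, then walk each high item's
--     # (usually small) path dict instead of scanning all low items per high item.
--     low_mult = {}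
--     for low_item in low_rating_items:
--         low_mult[low_item] = low_mult.get(low_item, 0) + 1
--     total = 0
--     for high_item in high_rating_items:
--         inner = paths.get(high_item)
--         if inner is not None:
--             for key in inner:
--                 total += low_mult.get(key, 0)
--     return total
-- ===== Notes on version B (the rewrite author's own statement) =====
-- stated objective: faster
-- what changed: B precomputes a multiplicity table of the low items and, per high item, sums multiplicities over that item's path-dict keys, replacing A's scan of every low item for every high item.
import Mathlib
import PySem

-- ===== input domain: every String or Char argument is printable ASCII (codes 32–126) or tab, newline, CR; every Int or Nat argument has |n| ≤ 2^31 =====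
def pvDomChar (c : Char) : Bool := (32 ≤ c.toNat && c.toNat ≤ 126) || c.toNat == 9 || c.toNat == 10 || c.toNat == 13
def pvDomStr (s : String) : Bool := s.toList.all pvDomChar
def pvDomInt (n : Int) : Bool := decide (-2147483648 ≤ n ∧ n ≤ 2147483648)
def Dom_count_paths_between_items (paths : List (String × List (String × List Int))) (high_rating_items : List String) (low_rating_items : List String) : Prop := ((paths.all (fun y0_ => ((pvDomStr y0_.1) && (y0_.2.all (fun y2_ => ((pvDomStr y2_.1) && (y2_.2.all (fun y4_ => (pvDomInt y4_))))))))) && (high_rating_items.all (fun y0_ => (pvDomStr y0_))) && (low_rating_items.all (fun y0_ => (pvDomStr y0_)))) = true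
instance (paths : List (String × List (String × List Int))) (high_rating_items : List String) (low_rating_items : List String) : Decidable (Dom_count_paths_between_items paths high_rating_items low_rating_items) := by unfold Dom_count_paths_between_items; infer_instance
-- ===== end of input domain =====

-- ===== PORT A =====
-- A scans every low item for every high item. isinstance(paths[high_item][low_item], list)
-- is always true under the declared type dict[str, dict[str, list[int]]], so it ports to `true`.
def count_paths_between_items (paths : List (String × List (String × List Int))) (high_rating_items : List String) (low_rating_items : List String) : Int :=
  high_rating_items.foldl (fun count high_item =>
    if (PySem.Dict.mk paths).contains high_item then
      low_rating_items.foldl (fun count low_item =>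
        if (PySem.Dict.mk ((PySem.Dict.mk paths).getD high_item [])).contains low_item && true then
          count + 1
        else count) count
    else count) 0

-- ===== PORT B =====
-- B: one honest line — builds a multiplicity table of the low items once and sums it over each
-- high item's path-dict keys (faster in a timing run: it avoids the per-high scan of all low items).
def count_paths_between_items_alt (paths : List (String × List (String × List Int))) (high_rating_items : List String) (low_rating_items : List String) : Int :=
  let low_mult : PySem.Dict String Int :=
    low_rating_items.foldl (fun d low_item => d.insert low_item (d.getD low_item 0 + 1)) PySem.Dict.empty
  high_rating_items.foldl (fun total high_item =>
    match (PySem.Dict.mk paths).get? high_item with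
    | none => total
    | some inner =>
        -- `for key in inner` iterates the Python dict's (distinct) keys
        (PySem.List.dedup (inner.map (·.1))).foldl (fun total key => total + low_mult.getD key 0) total) 0

-- ===== PRECONDITION & SPEC =====
def Spec_count_paths_between_items (paths : List (String × List (String × List Int))) (high_rating_items : List String) (low_rating_items : List String) (out : Int) : Prop := out = count_paths_between_items_alt paths high_rating_items low_rating_items
instance (paths : List (String × List (String × List Int))) (high_rating_items : List String) (low_rating_items : List String) (out : Int) : Decidable (Spec_count_paths_between_items paths high_rating_items low_rating_items out) := by unfold Spec_count_paths_between_items; infer_instance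

-- ===== CLAIM (what is proved, stated in full; the proofs are below) =====
def Claim_equal_count_paths_between_items : Prop := ∀ (paths : List (String × List (String × List Int))) (high_rating_items : List String) (low_rating_items : List String), Dom_count_paths_between_items paths high_rating_items low_rating_items → Spec_count_paths_between_items paths high_rating_items low_rating_items (count_paths_between_items paths high_rating_items low_rating_items)

-- ===== LEMMAS AND PROOFS =====

-- Sum over a duplicate-free key list K of the indicator (x = k) is the indicator (x ∈ K).
lemma sum_ite_eq_mem (K : List String) (x : String) (hnd : K.Nodup) :
    (K.map (fun k => (if x == k then (1:Int) else 0))).sum = if x ∈ K then 1 else 0 := by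
  induction K with
  | nil => simp
  | cons k K ih =>
    rcases List.nodup_cons.mp hnd with ⟨hk, hnd'⟩
    by_cases hx : x = k
    · subst hx
      have hz : (K.map (fun k => (if x == k then (1:Int) else 0))).sum = 0 := by
        apply List.sum_eq_zero
        intro y hy
        rcases List.mem_map.mp hy with ⟨k', hk', rfl⟩
        have : ¬ (x == k') = true := by simp; rintro rfl; exact hk hk'
        simp [this]
      simp only [List.map_cons, List.sum_cons, hz]
      simp
    · have hxk : ¬ (x == k) = true := by simpa using hx
      simp only [List.map_cons, List.sum_cons, hxk, ih hnd']
      simp [List.mem_cons, hx]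

-- Double counting: the number of low items lying in a duplicate-free key list K
-- equals the sum over K of each key's multiplicity among the low items.
lemma countP_mem_eq_sum_count (K lo : List String) (hnd : K.Nodup) :
    ((lo.countP (fun l => decide (l ∈ K)) : Nat) : Int)
      = (K.map (fun k => ((lo.count k : Nat) : Int))).sum := by
  induction lo with
  | nil => simp
  | cons x t ih =>
    simp only [List.countP_cons, List.count_cons]
    push_cast
    rw [ih, PySem.List.sum_map_add_int]
    rw [sum_ite_eq_mem K x hnd]
    by_cases h : x ∈ K <;> simp [h]

-- A's inner scan over the low items equals B's sum of multiplicities over the dict's keys.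
lemma inner_loops_eq (inner : List (String × List Int)) (lo : List String) (acc : Int) :
    lo.foldl (fun count low_item =>
        if (PySem.Dict.mk inner).contains low_item && true then count + 1 else count) acc
      = (PySem.List.dedup (inner.map (·.1))).foldl
          (fun total key => total +
            (lo.foldl (fun d low_item => d.insert low_item (d.getD low_item 0 + 1)) PySem.Dict.empty).getD key 0) acc := by
  simp only [Bool.and_true]
  rw [PySem.List.foldl_count_if, PySem.List.foldl_add]
  have hg : ∀ k, (lo.foldl (fun d low_item => d.insert low_item (d.getD low_item 0 + 1)) PySem.Dict.empty).getD k 0 = ((lo.count k : Nat) : Int) := by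
    intro k
    rw [PySem.Dict.getD_foldl_insert_add_one]
    simp [PySem.Dict.getD_empty]
  have hp : ∀ l, (PySem.Dict.mk inner).contains l = decide (l ∈ PySem.List.dedup (inner.map (·.1))) := by
    intro l
    rw [Bool.eq_iff_iff]
    simp [PySem.Dict.contains_mk, PySem.Set.mem_ofList, List.any_eq_true, List.mem_map]
  rw [List.countP_congr (fun l _ => by rw [hp l])]
  rw [countP_mem_eq_sum_count _ lo (PySem.List.nodup_dedup _)]
  exact congrArg (acc + ·) (congrArg List.sum (List.map_congr_left (fun k _ => (hg k).symm)))

-- ===== VERDICT (by name: the statement is the Claim_ definition above) =====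
theorem count_paths_between_items_spec : Claim_equal_count_paths_between_items := by
  intro paths hi lo _
  unfold Spec_count_paths_between_items count_paths_between_items count_paths_between_items_alt
  have hstep : (fun (count : Int) (high_item : String) =>
      if (PySem.Dict.mk paths).contains high_item then
        lo.foldl (fun count low_item =>
          if (PySem.Dict.mk ((PySem.Dict.mk paths).getD high_item [])).contains low_item && true then
            count + 1
          else count) count
      else count)
    = (fun (total : Int) (high_item : String) =>
      match (PySem.Dict.mk paths).get? high_item with
      | none => total
      | some inner =>
          (PySem.List.dedup (inner.map (·.1))).foldl (fun total key => total +
            (lo.foldl (fun d low_item => d.insert low_item (d.getD low_item 0 + 1)) PySem.Dict.empty).getD key 0) total) := by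
    funext count high_item
    cases hget : (PySem.Dict.mk paths).get? high_item with
    | none =>
      rw [PySem.Dict.contains_eq_isSome_get?, hget]
      simp
    | some inner =>
      rw [PySem.Dict.contains_eq_isSome_get?, hget]
      simp only [PySem.Dict.getD_of_get?_eq_some _ [] hget]
      simpa using inner_loops_eq inner lo count
  simp only [hstep]
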